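-- pv_equiv track=rewrite | github.com/Henrique97/AASMA_EX | picada.py | getNashPositions
-- ===== SOURCE A (Python) =====
-- def getNashPositions(matrix):
-- 	nashCells=[]
-- 	maxForEachLine=[]
-- 	maxForEachCollumn=[]
-- 	for i in range((len(matrix))):
-- 		maxValCol=matrix[i][0][1]
-- 		collumnMax=[]
-- 		for j in range((len(matrix[0]))):
-- 			maxValLine=matrix[i][j][0]
-- 			if(matrix[i][j][1]>maxValCol):
-- 				collumnMax=[[i,j]]
-- 				maxValCol=matrix[i][j][1]
-- 			elif(matrix[i][j][1]==maxValCol):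
-- 				collumnMax.append([i,j])
-- 		maxForEachCollumn.append(collumnMax)
-- 	for i in range((len(matrix[0]))):
-- 		maxValLine=matrix[0][i][0]
-- 		lineMax=[]
-- 		for j in range((len(matrix))):
-- 			if(matrix[j][i][0]>maxValLine):
-- 				lineMax=[[j,i]]
-- 				maxValLine=matrix[j][i][0]
-- 			elif(matrix[j][i][0]==maxValLine):
-- 				lineMax.append([j,i])
-- 		maxForEachLine.append(lineMax)
-- 	for i in range(len(maxForEachCollumn)): #tamanho colunas
-- 		for j in range(len(maxForEachCollumn[i])): #tamanho linhas
-- 			for k in range(len(maxForEachLine[maxForEachCollumn[i][j][1]])):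
-- 				mineAction=maxForEachLine[maxForEachCollumn[i][j][1]]
-- 				if(i==mineAction[k][0] and maxForEachCollumn[i][j][1]==mineAction[k][1]):
-- 					nashCells.append(maxForEachCollumn[i][j])
-- 	return nashCells
-- ===== SOURCE B (Python) =====
-- def getNashPositions(matrix):
--     rows = len(matrix)
--     cols = len(matrix[0])
--     rowBest = [max(matrix[i][j][1] for j in range(cols)) for i in range(rows)]
--     colBest = [max(matrix[i][j][0] for i in range(rows)) for j in range(cols)]
--     return [[i, j] for i in range(rows) for j in range(cols)
--             if matrix[i][j][1] == rowBest[i] and matrix[i][j][0] == colBest[j]]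
-- ===== Notes on version B (the rewrite author's own statement) =====
-- stated objective: simpler
-- what changed: Replaces the per-row/per-column argmax POSITION lists and the triple-nested list intersection by two best-VALUE tables and one direct row-major double pass that emits [i,j] when both payoffs equal their table entries.
import Mathlib
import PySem

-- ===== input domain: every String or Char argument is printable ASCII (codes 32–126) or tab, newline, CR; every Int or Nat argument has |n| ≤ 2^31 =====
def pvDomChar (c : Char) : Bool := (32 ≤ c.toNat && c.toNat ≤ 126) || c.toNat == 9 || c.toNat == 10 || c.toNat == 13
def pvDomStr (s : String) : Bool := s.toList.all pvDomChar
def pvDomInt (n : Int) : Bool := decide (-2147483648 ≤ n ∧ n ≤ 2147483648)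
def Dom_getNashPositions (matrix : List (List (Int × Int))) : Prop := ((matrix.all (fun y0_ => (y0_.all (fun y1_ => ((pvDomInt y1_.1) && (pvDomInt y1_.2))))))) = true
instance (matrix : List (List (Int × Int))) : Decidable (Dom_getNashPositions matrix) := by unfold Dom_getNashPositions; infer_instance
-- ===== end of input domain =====

-- B replaces A's per-row/per-column argmax POSITION lists and triple-nested intersection
-- by two best-VALUE tables and one direct row-major double pass (objective: simpler).

-- ===== PORT A =====

-- matrix[i][j]; inside Pre_ every access A/B performs is in range, so the default is never returned there
def pvCell (matrix : List (List (Int × Int))) (i j : Nat) : Int × Int :=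
  (matrix.getD i []).getD j (0, 0)

-- A's first inner loop (body of 'for i in range(len(matrix))'): running max of the 2nd payoff in row i
def pvColFold (matrix : List (List (Int × Int))) (i : Nat) : Int × List (List Int) :=
  (List.range (matrix.getD 0 []).length).foldl
    (fun (st : Int × List (List Int)) j =>
      if (pvCell matrix i j).2 > st.1 then ((pvCell matrix i j).2, [([(i : Int), (j : Int)] : List Int)])
      else if (pvCell matrix i j).2 = st.1 then (st.1, st.2 ++ [([(i : Int), (j : Int)] : List Int)])
      else st)
    ((pvCell matrix i 0).2, [])

-- A's second inner loop (body of 'for i in range(len(matrix[0]))'): running max of the 1st payoff in column i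
def pvLineFold (matrix : List (List (Int × Int))) (i : Nat) : Int × List (List Int) :=
  (List.range matrix.length).foldl
    (fun (st : Int × List (List Int)) j =>
      if (pvCell matrix j i).1 > st.1 then ((pvCell matrix j i).1, [([(j : Int), (i : Int)] : List Int)])
      else if (pvCell matrix j i).1 = st.1 then (st.1, st.2 ++ [([(j : Int), (i : Int)] : List Int)])
      else st)
    ((pvCell matrix 0 i).1, [])

-- A's third (triple-nested) loop; Python indexes maxForEachLine by the nonnegative int
-- maxForEachCollumn[i][j][1], so .toNat is exact there
def pvTriple (colMaps lineMaps : List (List (List Int))) : List (List Int) :=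
  (List.range colMaps.length).foldl (fun acc i =>
    (List.range (colMaps.getD i []).length).foldl (fun acc j =>
      (List.range (lineMaps.getD (((colMaps.getD i []).getD j []).getD 1 0).toNat []).length).foldl
        (fun acc k =>
          if ((i : Int) = ((lineMaps.getD (((colMaps.getD i []).getD j []).getD 1 0).toNat []).getD k []).getD 0 0 ∧
              ((colMaps.getD i []).getD j []).getD 1 0 =
                ((lineMaps.getD (((colMaps.getD i []).getD j []).getD 1 0).toNat []).getD k []).getD 1 0)
          then acc ++ [(colMaps.getD i []).getD j []] else acc) acc) acc) []

def getNashPositions (matrix : List (List (Int × Int))) : List (List Int) :=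
  pvTriple ((List.range matrix.length).map (fun i => (pvColFold matrix i).2))
           ((List.range (matrix.getD 0 []).length).map (fun i => (pvLineFold matrix i).2))

-- ===== PORT B =====

-- Python max(nonempty iterable) of ints; on the empty list Python raises (excluded by Pre_)
def pvMax (l : List Int) : Int := l.foldl max (l.headD 0)

def getNashPositions_alt (matrix : List (List (Int × Int))) : List (List Int) :=
  let rows := matrix.length
  let cols := (matrix.getD 0 []).length
  let rowBest := (List.range rows).map (fun i => pvMax ((List.range cols).map (fun j => (pvCell matrix i j).2)))
  let colBest := (List.range cols).map (fun j => pvMax ((List.range rows).map (fun i => (pvCell matrix i j).1)))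
  (List.range rows).flatMap (fun i =>
    ((List.range cols).filter (fun j =>
        ((pvCell matrix i j).2 == rowBest.getD i 0) && ((pvCell matrix i j).1 == colBest.getD j 0))).map
      (fun (j : Nat) => ([(i : Int), (j : Int)] : List Int)))

-- ===== PRECONDITION & SPEC =====
-- Pre_: exactly the inputs where Python A returns (no IndexError): the matrix is nonempty,
-- every row is nonempty (matrix[i][0] is read), and every row has at least len(matrix[0]) entries.
def Pre_getNashPositions (matrix : List (List (Int × Int))) : Prop :=
  matrix ≠ [] ∧ ∀ row ∈ matrix, row ≠ [] ∧ (matrix.headD []).length ≤ row.length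
instance (matrix : List (List (Int × Int))) : Decidable (Pre_getNashPositions matrix) := by
  unfold Pre_getNashPositions; infer_instance

def pvWitness_getNashPositions : (List (List (Int × Int))) := [[(1, 2), (0, 1)], [(3, 0), (1, 1)]]

def Spec_getNashPositions (matrix : List (List (Int × Int))) (out : List (List Int)) : Prop := out = getNashPositions_alt matrix
instance (matrix : List (List (Int × Int))) (out : List (List Int)) : Decidable (Spec_getNashPositions matrix out) := by unfold Spec_getNashPositions; infer_instance

-- ===== CLAIM (what is proved, stated in full; the proofs are below) =====
def Claim_equal_getNashPositions : Prop := ∀ (matrix : List (List (Int × Int))), Dom_getNashPositions matrix → Pre_getNashPositions matrix → Spec_getNashPositions matrix (getNashPositions matrix)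

-- ===== LEMMAS AND PROOFS =====

-- proof-side abbreviations: column count, the two best-value tables, the canonical output
def pvCols (matrix : List (List (Int × Int))) : Nat := (matrix.getD 0 []).length

def pvM2 (matrix : List (List (Int × Int))) (i : Nat) : Int :=
  (List.range (pvCols matrix)).foldl (fun a j => max a (pvCell matrix i j).2) (pvCell matrix i 0).2

def pvM1 (matrix : List (List (Int × Int))) (j : Nat) : Int :=
  (List.range matrix.length).foldl (fun a i => max a (pvCell matrix i j).1) (pvCell matrix 0 j).1

def pvCanon (matrix : List (List (Int × Int))) : List (List Int) :=
  (List.range matrix.length).flatMap (fun i =>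
    ((List.range (pvCols matrix)).filter (fun j =>
        ((pvCell matrix i j).1 == pvM1 matrix j) && ((pvCell matrix i j).2 == pvM2 matrix i))).map
      (fun (j : Nat) => ([(i : Int), (j : Int)] : List Int)))

-- A's first-pass result for row i / second-pass result for column j, in canonical form
def pvColList (m : List (List (Int × Int))) (i : Nat) : List (List Int) :=
  ((List.range (pvCols m)).filter (fun j => (pvCell m i j).2 == pvM2 m i)).map
    (fun (j : Nat) => ([(i : Int), (j : Int)] : List Int))

def pvLineList (m : List (List (Int × Int))) (j : Nat) : List (List Int) :=
  ((List.range m.length).filter (fun i' => (pvCell m i' j).1 == pvM1 m j)).map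
    (fun (i' : Nat) => ([(i' : Int), (j : Int)] : List Int))

-- the shared argmax loop shape of A's first two passes
lemma pvArgmaxFold (v : Nat → Int) (tag : Nat → List Int) (m0 : Int) (n : Nat) :
    (List.range n).foldl
      (fun (st : Int × List (List Int)) j =>
        if v j > st.1 then (v j, [tag j])
        else if v j = st.1 then (st.1, st.2 ++ [tag j]) else st) (m0, [])
    = ((List.range n).foldl (fun a j => max a (v j)) m0,
       ((List.range n).filter (fun j => v j == (List.range n).foldl (fun a j => max a (v j)) m0)).map tag) := by
  induction n with
  | zero => simp
  | succ n ih =>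
    have hb := (PySem.List.le_foldl_max_int (List.range n) v m0).2
    rw [List.range_succ, List.foldl_append, List.foldl_append, ih, List.filter_append]
    rcases lt_trichotomy ((List.range n).foldl (fun a j => max a (v j)) m0) (v n) with h | h | h
    · have hmax : max ((List.range n).foldl (fun a j => max a (v j)) m0) (v n) = v n := max_eq_right h.le
      simp only [List.foldl_cons, List.foldl_nil, if_pos h, hmax]
      have : (List.range n).filter (fun j => v j == v n) = [] := by
        apply List.filter_eq_nil_iff.mpr
        intro j hj
        have := hb j hj
        simp only [beq_iff_eq]
        omega
      simp [this]
    · have hmax : max ((List.range n).foldl (fun a j => max a (v j)) m0) (v n) = v n := by omega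
      simp only [List.foldl_cons, List.foldl_nil]
      rw [if_neg (by omega), if_pos h.symm]
      simp [← h]
    · have hmax : max ((List.range n).foldl (fun a j => max a (v j)) m0) (v n)
          = (List.range n).foldl (fun a j => max a (v j)) m0 := max_eq_left h.le
      simp only [List.foldl_cons, List.foldl_nil]
      rw [if_neg (by omega), if_neg (by omega)]
      have hne : ((v n == (List.range n).foldl (fun a j => max a (v j)) m0) = false) :=
        beq_eq_false_iff_ne.mpr (by omega)
      simp [hmax, hne]

-- a fold over the indices of a list, reading each element with getD, is a fold over the list
lemma pvFoldlRangeGetD {α β : Type} (l : List α) (d : α) (g : β → α → β) (a : β) :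
    (List.range l.length).foldl (fun acc k => g acc (l.getD k d)) a = l.foldl g a := by
  induction l generalizing a with
  | nil => simp
  | cons x xs ih =>
    simp only [List.length_cons, List.range_succ_eq_map, List.foldl_cons, List.foldl_map,
      List.getD_cons_zero, List.getD_cons_succ]
    exact ih (g a x)

-- a filter over range n matching one fixed index i < n
lemma pvFilterRangeSingle (n i : Nat) (q : Nat → Bool) (h : i < n) :
    (List.range n).filter (fun x => q x && (x == i)) = if q i then [i] else [] := by
  rw [← List.filter_filter, List.filter_beq i, List.count_range, if_pos h]
  cases hq : q i <;> simp [hq]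

lemma pvColList_eq (m : List (List (Int × Int))) (i : Nat) :
    (pvColFold m i).2 = pvColList m i := by
  unfold pvColFold
  rw [pvArgmaxFold (fun j => (pvCell m i j).2) (fun (j : Nat) => ([(i : Int), (j : Int)] : List Int))]
  simp only [pvColList, pvM2, pvCols]

lemma pvLineList_eq (m : List (List (Int × Int))) (j : Nat) :
    (pvLineFold m j).2 = pvLineList m j := by
  unfold pvLineFold
  rw [pvArgmaxFold (fun k => (pvCell m k j).1) (fun (k : Nat) => ([(k : Int), (j : Int)] : List Int))]
  simp only [pvLineList, pvM1]

-- the filtered line list matched against row i is a singleton or empty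
lemma pvFilterLine (m : List (List (Int × Int))) (i jc : Nat) (hi : i < m.length) :
    (pvLineList m jc).filter
        (fun e => decide ((i : Int) = e.getD 0 0 ∧ (jc : Int) = e.getD 1 0))
      = if (pvCell m i jc).1 == pvM1 m jc then [([(i : Int), (jc : Int)] : List Int)] else [] := by
  unfold pvLineList
  rw [List.filter_map, List.filter_filter]
  rw [List.filter_congr (l := List.range m.length)
      (q := fun x => ((pvCell m x jc).1 == pvM1 m jc) && (x == i))
      (by
        intro x _
        rcases eq_or_ne x i with rfl | hxi
        · simp
        · have h2 : ¬ ((i : Int) = (x : Int)) := by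
            intro h
            exact hxi (by exact_mod_cast h.symm)
          simp [Function.comp, h2, hxi])]
  rw [pvFilterRangeSingle m.length i _ hi]
  cases hq : ((pvCell m i jc).1 == pvM1 m jc) <;> simp

-- A's inner-most loop appends maxForEachCollumn[i][j] exactly once iff cell (i, c[1]) is a column max
lemma pvInnerStep (m : List (List (Int × Int))) (i : Nat) (hi : i < m.length)
    (acc : List (List Int)) (c : List Int) (hc : c ∈ pvColList m i) :
    (List.range (((List.range (pvCols m)).map (pvLineList m)).getD (c.getD 1 0).toNat []).length).foldl
      (fun acc k =>
        if ((i : Int) = ((((List.range (pvCols m)).map (pvLineList m)).getD (c.getD 1 0).toNat []).getD k []).getD 0 0 ∧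
            c.getD 1 0 = ((((List.range (pvCols m)).map (pvLineList m)).getD (c.getD 1 0).toNat []).getD k []).getD 1 0)
        then acc ++ [c] else acc) acc
    = if (pvCell m i (c.getD 1 0).toNat).1 == pvM1 m (c.getD 1 0).toNat then acc ++ [c] else acc := by
  obtain ⟨jc, hjc, rfl⟩ := List.mem_map.mp hc
  have hjcC : jc < pvCols m := List.mem_range.mp (List.mem_filter.mp hjc).1
  have hgc : (([(i : Int), (jc : Int)] : List Int).getD 1 0) = (jc : Int) := rfl
  simp only [hgc, Int.toNat_natCast]
  simp only [PySem.List.getD_map_range (pvLineList m) (pvCols m) jc [] hjcC]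
  calc
    (List.range (pvLineList m jc).length).foldl
        (fun acc k =>
          if ((i : Int) = ((pvLineList m jc).getD k []).getD 0 0 ∧
              (jc : Int) = ((pvLineList m jc).getD k []).getD 1 0)
          then acc ++ [([(i : Int), (jc : Int)] : List Int)] else acc) acc
      = (pvLineList m jc).foldl
          (fun acc e =>
            if ((i : Int) = e.getD 0 0 ∧ (jc : Int) = e.getD 1 0)
            then acc ++ [([(i : Int), (jc : Int)] : List Int)] else acc) acc :=
        pvFoldlRangeGetD (pvLineList m jc) []
          (fun acc e =>
            if ((i : Int) = e.getD 0 0 ∧ (jc : Int) = e.getD 1 0)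
            then acc ++ [([(i : Int), (jc : Int)] : List Int)] else acc) acc
    _ = acc ++ ((pvLineList m jc).filter
            (fun e => decide ((i : Int) = e.getD 0 0 ∧ (jc : Int) = e.getD 1 0))).map
          (fun _ => ([(i : Int), (jc : Int)] : List Int)) :=
        PySem.List.foldl_append_ite
          (p := fun (e : List Int) => ((i : Int) = e.getD 0 0 ∧ (jc : Int) = e.getD 1 0))
          (f := fun _ => ([(i : Int), (jc : Int)] : List Int))
          (pvLineList m jc) acc
    _ = if (pvCell m i jc).1 == pvM1 m jc
        then acc ++ [([(i : Int), (jc : Int)] : List Int)] else acc := by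
          rw [pvFilterLine m i jc hi]
          cases hq : ((pvCell m i jc).1 == pvM1 m jc) <;> simp

lemma pvTriple_canon (m : List (List (Int × Int))) :
    pvTriple ((List.range m.length).map (pvColList m)) ((List.range (pvCols m)).map (pvLineList m))
      = pvCanon m := by
  have hstep : ∀ (acc : List (List Int)), ∀ i ∈ List.range m.length,
      (List.range (((List.range m.length).map (pvColList m)).getD i []).length).foldl (fun acc j => (List.range (((List.range (pvCols m)).map (pvLineList m)).getD (((((List.range m.length).map (pvColList m)).getD i []).getD j []).getD 1 0).toNat []).length).foldl (fun acc k => if ((i : Int) = ((((List.range (pvCols m)).map (pvLineList m)).getD (((((List.range m.length).map (pvColList m)).getD i []).getD j []).getD 1 0).toNat []).getD k []).getD 0 0 ∧ ((((List.range m.length).map (pvColList m)).getD i []).getD j []).getD 1 0 = ((((List.range (pvCols m)).map (pvLineList m)).getD (((((List.range m.length).map (pvColList m)).getD i []).getD j []).getD 1 0).toNat []).getD k []).getD 1 0) then acc ++ [(((List.range m.length).map (pvColList m)).getD i []).getD j []] else acc) acc) acc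
      = acc ++
        ((List.range (pvCols m)).filter (fun j =>
            ((pvCell m i j).1 == pvM1 m j) && ((pvCell m i j).2 == pvM2 m i))).map
          (fun (j : Nat) => ([(i : Int), (j : Int)] : List Int)) := by
    intro acc i hiR
    have hi : i < m.length := List.mem_range.mp hiR
    simp only [PySem.List.getD_map_range (pvColList m) m.length i [] hi]
    calc
          (List.range (pvColList m i).length).foldl
              (fun acc j =>
                (List.range (((List.range (pvCols m)).map (pvLineList m)).getD
                    (((pvColList m i).getD j []).getD 1 0).toNat []).length).foldl
                  (fun acc k =>
                    if ((i : Int) = ((((List.range (pvCols m)).map (pvLineList m)).getD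
                          (((pvColList m i).getD j []).getD 1 0).toNat []).getD k []).getD 0 0 ∧
                        ((pvColList m i).getD j []).getD 1 0 =
                          ((((List.range (pvCols m)).map (pvLineList m)).getD
                            (((pvColList m i).getD j []).getD 1 0).toNat []).getD k []).getD 1 0)
                    then acc ++ [(pvColList m i).getD j []] else acc) acc) acc
            = (pvColList m i).foldl
                (fun acc c =>
                  (List.range (((List.range (pvCols m)).map (pvLineList m)).getD
                      (c.getD 1 0).toNat []).length).foldl
                    (fun acc k =>
                      if ((i : Int) = ((((List.range (pvCols m)).map (pvLineList m)).getD
                            (c.getD 1 0).toNat []).getD k []).getD 0 0 ∧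
                          c.getD 1 0 =
                            ((((List.range (pvCols m)).map (pvLineList m)).getD
                              (c.getD 1 0).toNat []).getD k []).getD 1 0)
                      then acc ++ [c] else acc) acc) acc :=
              pvFoldlRangeGetD (pvColList m i) []
                (fun acc c =>
                  (List.range (((List.range (pvCols m)).map (pvLineList m)).getD
                      (c.getD 1 0).toNat []).length).foldl
                    (fun acc k =>
                      if ((i : Int) = ((((List.range (pvCols m)).map (pvLineList m)).getD
                            (c.getD 1 0).toNat []).getD k []).getD 0 0 ∧
                          c.getD 1 0 =
                            ((((List.range (pvCols m)).map (pvLineList m)).getD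
                              (c.getD 1 0).toNat []).getD k []).getD 1 0)
                      then acc ++ [c] else acc) acc) acc
          _ = (pvColList m i).foldl
                (fun acc c =>
                  if (pvCell m i (c.getD 1 0).toNat).1 == pvM1 m (c.getD 1 0).toNat
                  then acc ++ [c] else acc) acc :=
              PySem.List.foldl_congr_mem _ _ _ _ (fun acc c hc => pvInnerStep m i hi acc c hc)
          _ = acc ++ (pvColList m i).filter
                (fun c => (pvCell m i (c.getD 1 0).toNat).1 == pvM1 m (c.getD 1 0).toNat) :=
              PySem.List.foldl_append_if_eq_filter _ _ _
          _ = acc ++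
              ((List.range (pvCols m)).filter (fun j =>
                  ((pvCell m i j).1 == pvM1 m j) && ((pvCell m i j).2 == pvM2 m i))).map
                (fun (j : Nat) => ([(i : Int), (j : Int)] : List Int)) := by
              unfold pvColList
              rw [List.filter_map, List.filter_filter]
              simp [Function.comp]
  unfold pvTriple
  simp only [List.length_map, List.length_range]
  exact Eq.trans (PySem.List.foldl_congr_mem _ _ _ _ hstep) (by
    rw [PySem.List.foldl_append_eq_flatMap]
    simp [pvCanon])


lemma pvA_eq_canon (matrix : List (List (Int × Int))) :
    getNashPositions matrix = pvCanon matrix := by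
  unfold getNashPositions
  rw [List.map_eq_map_iff.mpr (fun i _ => pvColList_eq matrix i),
      List.map_eq_map_iff.mpr (fun j _ => pvLineList_eq matrix j)]
  exact pvTriple_canon matrix

lemma pvMax_map_range (v : Nat → Int) (n : Nat) (hn : 0 < n) :
    pvMax ((List.range n).map v) = (List.range n).foldl (fun a j => max a (v j)) (v 0) := by
  obtain ⟨k, rfl⟩ : ∃ k, n = k + 1 := ⟨n - 1, by omega⟩
  rw [List.range_succ_eq_map]
  simp [pvMax, List.foldl_map]

lemma pvB_eq_canon (matrix : List (List (Int × Int))) :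
    getNashPositions_alt matrix = pvCanon matrix := by
  simp only [getNashPositions_alt, pvCanon]
  rcases Nat.eq_zero_or_pos matrix.length with hr | hr
  · simp [hr]
  rcases Nat.eq_zero_or_pos (matrix.getD 0 []).length with hc | hc
  · have hc' : (matrix[0]?.getD []).length = 0 := by
      simpa [List.getD_eq_getElem?_getD] using hc
    simp [hc', pvCols]
  apply List.flatMap_congr
  intro i hiR
  have hi : i < matrix.length := List.mem_range.mp hiR
  congr 1
  apply List.filter_congr
  intro j hjR
  have hj : j < (matrix.getD 0 []).length := List.mem_range.mp hjR
  rw [PySem.List.getD_map_range _ _ _ _ hi, PySem.List.getD_map_range _ _ _ _ hj,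
      pvMax_map_range _ _ hc, pvMax_map_range _ _ hr]
  simp only [pvM1, pvM2, pvCols]
  exact Bool.and_comm _ _

-- ===== VERDICT (by name: the statement is the Claim_ definition above) =====
theorem getNashPositions_spec : Claim_equal_getNashPositions := by
  intro matrix _ _
  unfold Spec_getNashPositions
  rw [pvA_eq_canon, pvB_eq_canon]
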